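-- pv_equiv track=rewrite | github.com/streamondemand-sod/plugin.video.g2 | g2/providers/__init__.py | _sources_groups
-- ===== SOURCE A (Python) =====
-- def _sources_groups(imdb, sources):
--     groups = {}
--     for src in sources:
--         key_video = _key_video(imdb=imdb, **src)
--         if key_video not in groups:
--             groups[key_video] = []
--         groups[key_video].append(src)
--
--     return groups
--
-- def _key_video(**kwargs):
--     # (fixme) move the db handling into libraries.database
--     return '/'.join([kwargs.get(k) or '0' for k in ['imdb', 'season', 'episode']])
-- ===== SOURCE B (Python) =====
-- def _sources_groups(imdb, sources):
--     # Two-pass decomposition: pair each source with its video key once, take the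
--     # distinct keys in first-occurrence order, then build the group for each key
--     # by filtering the keyed list.
--     keyed = [('/'.join([imdb or '0',
--                         src.get('season') or '0',
--                         src.get('episode') or '0']), src)
--              for src in sources]
--     keys = list(dict.fromkeys(k for k, _ in keyed))
--     return {k: [s for kk, s in keyed if kk == k] for k in keys}
-- ===== Notes on version B (the rewrite author's own statement) =====
-- stated objective: alternative
-- what changed: Replaces the single dict-building loop (membership test + append per source) with a two-pass decomposition: key every source once, dedup the keys in first-occurrence order, then build each group by filtering the keyed list; a stable-order grouping without incremental dict mutation.
-- outside the precondition, e.g. on _sources_groups('t', [{'imdb': 'x'}]): A raises TypeError, B returns {'t/0/0': [{'imdb': 'x'}]}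
-- crash fix: When some source dict contains the key 'imdb', A raises TypeError (duplicate keyword argument to _key_video) while B ignores it and returns the normal grouping. — e.g. on _sources_groups("t", [[("imdb", "x")]]): A raises TypeError, B returns [("t/0/0", [[("imdb", "x")]])]
import Mathlib
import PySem

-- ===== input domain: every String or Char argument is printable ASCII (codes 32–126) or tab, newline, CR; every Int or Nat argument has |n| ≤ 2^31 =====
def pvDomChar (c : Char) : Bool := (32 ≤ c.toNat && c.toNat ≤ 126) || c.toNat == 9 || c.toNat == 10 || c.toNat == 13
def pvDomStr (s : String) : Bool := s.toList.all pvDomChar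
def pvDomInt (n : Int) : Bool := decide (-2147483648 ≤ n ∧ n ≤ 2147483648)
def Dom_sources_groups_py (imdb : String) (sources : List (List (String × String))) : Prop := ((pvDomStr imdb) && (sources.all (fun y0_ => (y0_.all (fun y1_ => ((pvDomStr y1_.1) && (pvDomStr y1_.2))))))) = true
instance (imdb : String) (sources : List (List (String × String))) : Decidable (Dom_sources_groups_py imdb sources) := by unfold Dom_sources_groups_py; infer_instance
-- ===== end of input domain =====

-- B replaces A's single dict-building loop with key-then-dedup-then-filter (alternative decomposition, same return value).

-- ===== PORT A =====
-- port of _key_video(imdb=imdb, **src): '/'.join(kwargs.get(k) or '0' for k in ['imdb','season','episode'])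
def keyVideo (imdb : String) (src : List (String × String)) : String :=
  PySem.Str.join "/"
    [(if imdb = "" then "0" else imdb),
     (match (PySem.Dict.mk src).get? "season" with | none => "0" | some v => if v = "" then "0" else v),
     (match (PySem.Dict.mk src).get? "episode" with | none => "0" | some v => if v = "" then "0" else v)]

def sources_groups_py (imdb : String) (sources : List (List (String × String))) : List (String × List (List (String × String))) :=
  (sources.foldl
    (fun groups src =>
      let k := keyVideo imdb src
      let groups := if groups.contains k then groups else groups.insert k []
      groups.modify k [] (fun l => l ++ [src]))
    PySem.Dict.empty).items

-- ===== PORT B =====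
def sources_groups_py_alt (imdb : String) (sources : List (List (String × String))) : List (String × List (List (String × String))) :=
  let keyed := sources.map (fun src => (keyVideo imdb src, src))
  let keys := PySem.List.dedup (keyed.map (·.1))
  keys.map (fun k => (k, (keyed.filter (fun p => p.1 == k)).map (·.2)))

-- ===== PRECONDITION & SPEC =====
-- Pre_ excludes sources containing an 'imdb' key: there A raises TypeError (duplicate keyword argument).
def Pre_sources_groups_py (imdb : String) (sources : List (List (String × String))) : Prop :=
  ∀ src ∈ sources, ∀ p ∈ src, p.1 ≠ "imdb"
instance (imdb : String) (sources : List (List (String × String))) : Decidable (Pre_sources_groups_py imdb sources) := by unfold Pre_sources_groups_py; infer_instance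
def pvWitness_sources_groups_py : String × (List (List (String × String))) :=
  ("tt1", [[("season", "1"), ("episode", "2")], [("season", "1"), ("episode", "2")], []])

-- When some source dict contains the key 'imdb', A raises TypeError while B returns the normal grouping.
def Raises_sources_groups_py (imdb : String) (sources : List (List (String × String))) : Prop :=
  ∃ src ∈ sources, ∃ p ∈ src, p.1 = "imdb"
instance (imdb : String) (sources : List (List (String × String))) : Decidable (Raises_sources_groups_py imdb sources) := by unfold Raises_sources_groups_py; infer_instance
def pvRaiseWitness_sources_groups_py : String × (List (List (String × String))) := ("t", [[("imdb", "x")]])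
def pvRaiseWitnessOut_sources_groups_py : List (String × List (List (String × String))) := [("t/0/0", [[("imdb", "x")]])]

def Spec_sources_groups_py (imdb : String) (sources : List (List (String × String))) (out : List (String × List (List (String × String)))) : Prop := out = sources_groups_py_alt imdb sources
instance (imdb : String) (sources : List (List (String × String))) (out : List (String × List (List (String × String)))) : Decidable (Spec_sources_groups_py imdb sources out) := by unfold Spec_sources_groups_py; infer_instance

-- ===== CLAIM (what is proved, stated in full; the proofs are below) =====
def Claim_equal_sources_groups_py : Prop := ∀ (imdb : String) (sources : List (List (String × String))), Dom_sources_groups_py imdb sources → Pre_sources_groups_py imdb sources → Spec_sources_groups_py imdb sources (sources_groups_py imdb sources)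
def Claim_raises_sources_groups_py : Prop := (∀ (imdb : String) (sources : List (List (String × String))), Dom_sources_groups_py imdb sources → Raises_sources_groups_py imdb sources → ¬ Pre_sources_groups_py imdb sources) ∧ (Dom_sources_groups_py (pvRaiseWitness_sources_groups_py.1) (pvRaiseWitness_sources_groups_py.2) ∧ Raises_sources_groups_py (pvRaiseWitness_sources_groups_py.1) (pvRaiseWitness_sources_groups_py.2) ∧ sources_groups_py_alt (pvRaiseWitness_sources_groups_py.1) (pvRaiseWitness_sources_groups_py.2) = pvRaiseWitnessOut_sources_groups_py)

-- ===== LEMMAS AND PROOFS =====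

-- A's 'if k not in groups: groups[k] = []' followed by append is groups.modify k [] (· ++ [src]).
theorem insert_then_modify {ν : Type} (d : PySem.Dict String ν) (k : String) (d0 : ν) (f : ν → ν) :
    (if d.contains k then d else d.insert k d0).modify k d0 f = d.modify k d0 f := by
  by_cases h : d.contains k
  · simp [h]
  · have h' : d.contains k = false := by simpa using h
    simp [h', PySem.Dict.modify, PySem.Dict.getD_insert_self,
      PySem.Dict.insert_insert_self, PySem.Dict.getD_of_not_contains]

theorem sources_groups_items (imdb : String) (sources : List (List (String × String))) :
    sources_groups_py imdb sources = sources_groups_py_alt imdb sources := by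
  unfold sources_groups_py sources_groups_py_alt
  have hstep : (fun (groups : PySem.Dict String (List (List (String × String)))) src =>
      let k := keyVideo imdb src
      let groups := if groups.contains k then groups else groups.insert k []
      groups.modify k [] (fun l => l ++ [src]))
      = fun groups src => groups.modify (keyVideo imdb src) [] (fun l => l ++ [src]) := by
    funext d s
    exact insert_then_modify d (keyVideo imdb s) [] (fun l => l ++ [s])
  rw [hstep]
  have hfold : sources.foldl
      (fun groups src => groups.modify (keyVideo imdb src) [] (fun l => l ++ [src]))
      PySem.Dict.empty
      = (sources.map (fun src => (keyVideo imdb src, src))).foldl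
          (fun d p => d.modify p.1 [] (fun l => l ++ [p.2])) PySem.Dict.empty := by
    rw [List.foldl_map]
  rw [hfold]
  set l := sources.map (fun src => (keyVideo imdb src, src)) with hl
  set d := l.foldl (fun d p => d.modify p.1 [] (fun t => t ++ [p.2])) PySem.Dict.empty with hd
  have hnd : d.keys.Nodup := by
    rw [hd]
    exact PySem.Dict.nodup_keys_foldl_modify_key l (·.1) [] (fun d p => (fun t => t ++ [p.2]))
      PySem.Dict.empty (by simp [PySem.Dict.keys_empty])
  have hkeys : d.keys = PySem.Set.ofList (l.map (·.1)) := by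
    rw [hd, PySem.Dict.keys_foldl_modify_key]
    simp [PySem.Dict.keys_empty, PySem.Set.update_nil_left]
  rw [PySem.Dict.items_eq_map_keys d hnd [], hkeys]
  simp only [PySem.List.dedup_eq_ofList]
  apply List.map_congr_left
  intro k _
  have hg : d.getD k [] = (l.filter (fun p => p.1 == k)).map (·.2) := by
    rw [hd, PySem.Dict.getD_foldl_modify_append]
    simp [PySem.Dict.getD_empty]
  rw [hg]

-- ===== VERDICT (by name: the statement is the Claim_ definition above) =====
theorem sources_groups_py_spec : Claim_equal_sources_groups_py := by
  intro imdb sources _ _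
  exact sources_groups_items imdb sources

def sources_groups_py_raises : Claim_raises_sources_groups_py := by
  unfold Claim_raises_sources_groups_py
  refine ⟨?_, by decide⟩
  rintro imdb sources _ ⟨src, hs, p, hp, he⟩ hpre
  exact hpre src hs p hp he
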